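-- pv_equiv track=rewrite | github.com/OPTIMISTICLE/CodeODC | def computeMultiplesSum(n):.py | computeMultiplesSum
-- ===== SOURCE A (Python) =====
-- def computeMultiplesSum(n):
--     """Cette fonction renvoie la somme de tous les mutliples positifs de 3 ou 5 ou 7 strictement inferieur a n"""
--
--     x = 3
--     y = 5
--     z = 7
--     summ = 0
--     for i in range(n):
--         if x * i < n:
--             summ += x * i
--         if y * i < n:
--             summ += y * i
--         if z * i < n:
--             summ += z * i
--
--     return summ
-- ===== SOURCE B (Python) =====
-- def computeMultiplesSum(n):
--     """Cette fonction renvoie la somme de tous les mutliples positifs de 3 ou 5 ou 7 strictement inferieur a n"""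
--     if n <= 0:
--         return 0
--     total = 0
--     for k in (3, 5, 7):
--         m = (n - 1) // k          # largest i with k*i < n
--         total += k * m * (m + 1) // 2
--     return total
-- ===== Notes on version B (the rewrite author's own statement) =====
-- stated objective: faster
-- what changed: Replaces A's O(n) loop over range(n) (adding each multiple of 3, 5, 7 separately, double-counting overlaps like A does) by a closed-form Gauss arithmetic-series sum per divisor: k*m*(m+1)//2 with m=(n-1)//k.
import Mathlib
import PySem

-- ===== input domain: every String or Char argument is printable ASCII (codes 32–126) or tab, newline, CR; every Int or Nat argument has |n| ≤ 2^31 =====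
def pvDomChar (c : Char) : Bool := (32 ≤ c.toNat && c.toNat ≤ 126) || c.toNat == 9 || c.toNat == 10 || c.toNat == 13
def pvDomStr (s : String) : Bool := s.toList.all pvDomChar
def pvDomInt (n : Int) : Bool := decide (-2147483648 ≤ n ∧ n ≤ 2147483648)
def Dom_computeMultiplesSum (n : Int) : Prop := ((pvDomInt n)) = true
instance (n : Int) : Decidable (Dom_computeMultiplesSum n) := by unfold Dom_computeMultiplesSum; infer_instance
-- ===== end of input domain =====

-- B replaces A's O(n) loop by the closed-form arithmetic-series sum per divisor (O(1)); same overlap-counting behaviour.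
-- ===== PORT A =====
def computeMultiplesSum (n : Int) : Int :=
  let x : Int := 3
  let y : Int := 5
  let z : Int := 7
  (PySem.List.pyRange 0 n 1).foldl (fun summ i =>
    let summ := if x * i < n then summ + x * i else summ
    let summ := if y * i < n then summ + y * i else summ
    let summ := if z * i < n then summ + z * i else summ
    summ) 0

-- ===== PORT B =====
def computeMultiplesSum_alt (n : Int) : Int :=
  if n ≤ 0 then 0
  else
    ([3, 5, 7] : List Int).foldl (fun total k =>
      let m := PySem.Int.floordiv (n - 1) k
      total + PySem.Int.floordiv (k * m * (m + 1)) 2) 0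

-- ===== PRECONDITION & SPEC =====
def Spec_computeMultiplesSum (n : Int) (out : Int) : Prop := out = computeMultiplesSum_alt n
instance (n : Int) (out : Int) : Decidable (Spec_computeMultiplesSum n out) := by unfold Spec_computeMultiplesSum; infer_instance

-- ===== CLAIM (what is proved, stated in full; the proofs are below) =====
def Claim_equal_computeMultiplesSum : Prop := ∀ (n : Int), Dom_computeMultiplesSum n → Spec_computeMultiplesSum n (computeMultiplesSum n)

-- ===== LEMMAS AND PROOFS =====

-- the contribution of one divisor k over range(n)
def contrib (n k i : Int) : Int := if k * i < n then k * i else 0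

lemma body_eq (n summ i : Int) :
    (let s1 := if 3 * i < n then summ + 3 * i else summ
     let s2 := if 5 * i < n then s1 + 5 * i else s1
     let s3 := if 7 * i < n then s2 + 7 * i else s2
     s3) = summ + (contrib n 3 i + contrib n 5 i + contrib n 7 i) := by
  simp only [contrib]
  split_ifs <;> ring

lemma gauss (M : Nat) :
    2 * ((List.range M).map (fun (j : Nat) => (j : Int))).sum = (M : Int) * ((M : Int) - 1) := by
  induction M with
  | zero => simp
  | succ M ih =>
    rw [List.range_succ]
    simp only [List.map_append, List.sum_append, List.map_cons, List.map_nil,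
      List.sum_cons, List.sum_nil]
    push_cast
    nlinarith [ih]

lemma sum_contrib_eq (n k : Int) (hk : 0 < k) (hn : 1 ≤ n) :
    ((PySem.List.pyRange 0 n 1).map (contrib n k)).sum
      = PySem.Int.floordiv
          (k * PySem.Int.floordiv (n - 1) k * (PySem.Int.floordiv (n - 1) k + 1)) 2 := by
  set m : Int := PySem.Int.floordiv (n - 1) k with hm
  have hbr : m * k ≤ n - 1 ∧ n - 1 < (m + 1) * k :=
    (PySem.Int.floordiv_eq_iff_of_pos hk).mp hm.symm
  have hm0 : 0 ≤ m := by
    rw [hm, PySem.Int.le_floordiv_iff_mul_le hk]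
    nlinarith
  set M : Nat := m.toNat + 1 with hM
  have hMi : ((M : Nat) : Int) = m + 1 := by omega
  have hMN : M ≤ n.toNat := by
    have : m + 1 ≤ n := by nlinarith
    omega
  have hrange : PySem.List.pyRange 0 n 1
      = (List.range n.toNat).map (fun (j : Nat) => (j : Int)) := by
    rw [PySem.List.pyRange_one]
    simp only [sub_zero, zero_add]
  have hsplit : List.range n.toNat
      = List.range M ++ (List.range (n.toNat - M)).map (fun j => M + j) := by
    rw [← List.range_add]
    congr 1
    omega
  rw [hrange, hsplit]
  simp only [List.map_append, List.sum_append, List.map_map, Function.comp_def]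
  have htail : ((List.range (n.toNat - M)).map
      (fun (j : Nat) => contrib n k ((M + j : Nat) : Int))).sum = 0 := by
    apply List.sum_eq_zero
    intro x hx
    simp only [List.mem_map, List.mem_range] at hx
    obtain ⟨j, _, rfl⟩ := hx
    have hcast : ((M + j : Nat) : Int) = m + 1 + (j : Int) := by push_cast; omega
    rw [contrib, if_neg, ]
    rw [hcast]
    push Not
    nlinarith [Int.natCast_nonneg j]
  have hhead : (List.range M).map (fun (j : Nat) => contrib n k (j : Int))
      = (List.range M).map (fun (j : Nat) => k * (j : Int)) := by
    apply List.map_congr_left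
    intro j hj
    rw [List.mem_range] at hj
    have hjm : ((j : Nat) : Int) ≤ m := by omega
    rw [contrib, if_pos]
    nlinarith [Int.natCast_nonneg j]
  rw [htail, add_zero, hhead]
  have hmul : ((List.range M).map (fun (j : Nat) => k * (j : Int))).sum
      = k * ((List.range M).map (fun j => ((j : Nat) : Int))).sum := by
    rw [← List.sum_map_mul_left]
  rw [hmul]
  have hg := gauss M
  rw [PySem.Int.floordiv_eq_ediv_of_pos (by norm_num : (0:Int) < 2)]
  have hkey : k * m * (m + 1)
      = 2 * (k * ((List.range M).map (fun j => ((j : Nat) : Int))).sum) := by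
    rw [hMi] at hg
    nlinarith [hg]
  rw [hkey, Int.mul_ediv_cancel_left _ (by norm_num : (2:Int) ≠ 0)]
-- ===== VERDICT (by name: the statement is the Claim_ definition above) =====
theorem computeMultiplesSum_spec : Claim_equal_computeMultiplesSum := by
  intro n _
  unfold Spec_computeMultiplesSum computeMultiplesSum computeMultiplesSum_alt
  by_cases hn : n ≤ 0
  · rw [PySem.List.pyRange_one_eq_nil hn, if_pos hn]
    rfl
  · push Not at hn
    have hn1 : 1 ≤ n := hn
    rw [if_neg (by omega)]
    have hbody : ∀ (summ i : Int),
        (let s1 := if 3 * i < n then summ + 3 * i else summ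
         let s2 := if 5 * i < n then s1 + 5 * i else s1
         let s3 := if 7 * i < n then s2 + 7 * i else s2
         s3) = summ + (contrib n 3 i + contrib n 5 i + contrib n 7 i) := body_eq n
    simp only at hbody ⊢
    rw [show (fun (summ i : Int) =>
        if 7 * i < n then
          (if 5 * i < n then (if 3 * i < n then summ + 3 * i else summ) + 5 * i
           else (if 3 * i < n then summ + 3 * i else summ)) + 7 * i
        else (if 5 * i < n then (if 3 * i < n then summ + 3 * i else summ) + 5 * i
           else (if 3 * i < n then summ + 3 * i else summ)))
      = (fun (summ i : Int) => summ + (contrib n 3 i + contrib n 5 i + contrib n 7 i))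
      from funext fun summ => funext fun i => hbody summ i]
    rw [PySem.List.foldl_add]
    have h3 := sum_contrib_eq n 3 (by norm_num) hn1
    have h5 := sum_contrib_eq n 5 (by norm_num) hn1
    have h7 := sum_contrib_eq n 7 (by norm_num) hn1
    simp only [List.foldl_cons, List.foldl_nil]
    rw [PySem.List.sum_map_add_int, PySem.List.sum_map_add_int, h3, h5, h7]
    ring
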